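-- pv_equiv track=rewrite | github.com/Rymul/DSA_Python | graphs.py | closest_carrot
-- ===== SOURCE A (Python) =====
-- from collections import deque
--
-- def closest_carrot(grid, starting_row, starting_col):
--     visited = set([(starting_row, starting_col)])
--     queue = deque([ (starting_row, starting_col, 0) ])
--     while queue:
--         row, col, distance = queue.popleft()
--         if grid[row][col] == 'C':
--             return distance
--         deltas = [(1, 0), (-1, 0), (0, 1), (0, -1)]
--         for delta in deltas:
--             delta_row, delta_col = delta
--             neighbor_row = row + delta_row
--             neighbor_col = col + delta_col
--             row_inbounds = 0 <= neighbor_row < len(grid)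
--             col_inbounds = 0 <= neighbor_col < len(grid[0])
--             pos = (neighbor_row, neighbor_col)
--             if row_inbounds and col_inbounds and grid[neighbor_row][neighbor_col] != 'X' and pos not in visited:
--                 queue.append((neighbor_row, neighbor_col, distance +1))
--                 visited.add(pos)
--     return -1
-- ===== SOURCE B (Python) =====
-- def closest_carrot(grid, starting_row, starting_col):
--     # Grassfire / Bellman-Ford dynamic program: no queue, no visited set.  A
--     # distance grid is seeded from the start cell and synchronously relaxed to a
--     # fixpoint; the answer is the minimum distance over carrot cells.
--     if grid[starting_row][starting_col] == 'C':
--         return 0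
--     rows, cols = len(grid), len(grid[0])
--     inf = rows * cols + 1
--     dist = [[inf] * cols for _ in range(rows)]
--     for nr, nc in ((starting_row + 1, starting_col), (starting_row - 1, starting_col),
--                    (starting_row, starting_col + 1), (starting_row, starting_col - 1)):
--         if 0 <= nr < rows and 0 <= nc < cols and grid[nr][nc] != 'X':
--             dist[nr][nc] = 1
--     while True:
--         new = [[dist[r][c] if grid[r][c] == 'X' else
--                 min([dist[r][c]] +
--                     [dist[nr][nc] + 1
--                      for nr, nc in ((r + 1, c), (r - 1, c), (r, c + 1), (r, c - 1))
--                      if 0 <= nr < rows and 0 <= nc < cols])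
--                 for c in range(cols)]
--                for r in range(rows)]
--         if new == dist:
--             break
--         dist = new
--     best = inf
--     for r in range(rows):
--         for c in range(cols):
--             if grid[r][c] == 'C' and dist[r][c] < best:
--                 best = dist[r][c]
--     return best if best < inf else -1
-- ===== Notes on version B (the rewrite author's own statement) =====
-- stated objective: alternative
-- what changed: Replaces the deque BFS with visited set by a grassfire/Bellman-Ford dynamic program: a distance grid seeded from the start cell is synchronously relaxed to a fixpoint and the answer is the minimum distance over carrot cells.
-- outside the precondition, e.g. on closest_carrot([['.', '.'], ['C']], 0, 0): A returns 1, B raises IndexError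
import Mathlib
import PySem

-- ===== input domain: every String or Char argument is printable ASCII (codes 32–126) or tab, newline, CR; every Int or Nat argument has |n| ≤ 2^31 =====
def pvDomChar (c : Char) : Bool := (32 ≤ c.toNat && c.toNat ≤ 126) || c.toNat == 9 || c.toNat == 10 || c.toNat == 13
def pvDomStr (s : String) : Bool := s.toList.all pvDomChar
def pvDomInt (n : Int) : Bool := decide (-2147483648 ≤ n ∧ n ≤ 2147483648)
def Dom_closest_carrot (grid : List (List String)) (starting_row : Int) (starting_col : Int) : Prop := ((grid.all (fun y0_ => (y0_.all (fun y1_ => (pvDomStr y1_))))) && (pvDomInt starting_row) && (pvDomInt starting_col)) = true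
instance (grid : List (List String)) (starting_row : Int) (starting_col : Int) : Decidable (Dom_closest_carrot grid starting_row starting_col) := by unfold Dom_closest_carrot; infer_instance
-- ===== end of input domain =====

-- B replaces A's queue BFS by a grassfire/Bellman-Ford dynamic program (a distance grid seeded
-- from the start and synchronously relaxed to a fixpoint, then the minimum over carrot cells);
-- same return value, objective: alternative algorithm.

-- shared grid helpers: grid[r][c] (Python indexing, total form), len(grid), len(grid[0])
def pvCell (grid : List (List String)) (r c : Int) : String :=
  ((PySem.List.pyGet? grid r).bind (fun row => PySem.List.pyGet? row c)).getD ""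
def nC (grid : List (List String)) : Nat := ((PySem.List.pyGet? grid 0).getD []).length
def pvRows (grid : List (List String)) : Int := (grid.length : Int)
def pvCols (grid : List (List String)) : Int := (nC grid : Int)
abbrev ccInBox (grid : List (List String)) (p : Int × Int) : Prop :=
  0 ≤ p.1 ∧ p.1 < pvRows grid ∧ 0 ≤ p.2 ∧ p.2 < pvCols grid
abbrev ccGuard (grid : List (List String)) (vis : PySem.Set (Int × Int)) (p : Int × Int) : Prop :=
  ccInBox grid p ∧ pvCell grid p.1 p.2 ≠ "X" ∧ ¬ p ∈ vis

-- ===== PORT A =====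
-- the while loop of A: queue of (row, col, distance) triples; fuel is a totality guard only
def ccLoopA (grid : List (List String)) : Nat → List (Int × Int × Int) → PySem.Set (Int × Int) → Int
  | 0, _, _ => -1
  | _ + 1, [], _ => -1
  | fuel + 1, (row, col, distance) :: rest, visited =>
    if pvCell grid row col = "C" then distance
    else
      let st := ([(1, 0), (-1, 0), (0, 1), (0, -1)] : List (Int × Int)).foldl
        (fun (st : List (Int × Int × Int) × PySem.Set (Int × Int)) delta =>
          if ccGuard grid st.2 (row + delta.1, col + delta.2) then
            (st.1 ++ [(row + delta.1, col + delta.2, distance + 1)],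
             PySem.Set.add st.2 (row + delta.1, col + delta.2))
          else st) (rest, visited)
      ccLoopA grid fuel st.1 st.2

def closest_carrot (grid : List (List String)) (starting_row : Int) (starting_col : Int) : Int :=
  ccLoopA grid (5 * (grid.length * nC grid) + 5)
    [(starting_row, starting_col, 0)] (PySem.Set.ofList [(starting_row, starting_col)])

-- ===== PORT B =====
-- the four neighbour coordinates, in Source B's tuple order
def bCands (r c : Int) : List (Int × Int) := [(r + 1, c), (r - 1, c), (r, c + 1), (r, c - 1)]

-- dist[r][c]: Source B only reads in-bounds nonnegative indices, where this total form is exact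
def bGet (dist : List (List Int)) (r c : Int) : Int :=
  ((PySem.List.pyGet? dist r).bind (fun row => PySem.List.pyGet? row c)).getD 0

-- inf = rows * cols + 1
def bInf (grid : List (List String)) : Int := pvRows grid * pvCols grid + 1

-- the seeding loop: dist[nr][nc] = 1 for in-bounds non-'X' neighbours of the start
-- (indices are guarded 0 ≤ nr < rows, 0 ≤ nc < cols, so .toNat is exact here)
def bSeed (grid : List (List String)) (sr sc : Int) : List (List Int) :=
  (bCands sr sc).foldl
    (fun dist p =>
      if ccInBox grid p ∧ pvCell grid p.1 p.2 ≠ "X" then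
        dist.modify p.1.toNat (fun row => row.set p.2.toNat 1)
      else dist)
    (List.replicate grid.length (List.replicate (nC grid) (bInf grid)))

-- one synchronous relaxation round (the `new = [[...]]` comprehension)
def bStep (grid : List (List String)) (dist : List (List Int)) : List (List Int) :=
  (List.range grid.length).map (fun (r : Nat) =>
    (List.range (nC grid)).map (fun (c : Nat) =>
      if pvCell grid (r : Int) (c : Int) = "X" then bGet dist (r : Int) (c : Int)
      else (PySem.List.min?
              ([bGet dist (r : Int) (c : Int)] ++
                (bCands (r : Int) (c : Int)).filterMap (fun p =>
                  if ccInBox grid p then some (bGet dist p.1 p.2 + 1) else none))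
              (fun x => x)).getD 0))

-- the `while True` loop: relax until the grid stops changing; fuel is a totality guard only
def bLoop (grid : List (List String)) : Nat → List (List Int) → List (List Int)
  | 0, dist => dist
  | fuel + 1, dist =>
    let new := bStep grid dist
    if new = dist then dist else bLoop grid fuel new

-- the final double loop taking the minimum distance over carrot cells
def bBest (grid : List (List String)) (dist : List (List Int)) : Int :=
  (List.range grid.length).foldl (fun (best : Int) (r : Nat) =>
    (List.range (nC grid)).foldl (fun (best : Int) (c : Nat) =>
      if pvCell grid (r : Int) (c : Int) = "C" ∧ bGet dist (r : Int) (c : Int) < best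
      then bGet dist (r : Int) (c : Int) else best) best)
    (bInf grid)

def closest_carrot_alt (grid : List (List String)) (starting_row : Int) (starting_col : Int) : Int :=
  if pvCell grid starting_row starting_col = "C" then 0
  else
    let dist := bLoop grid (grid.length * nC grid + 2) (bSeed grid starting_row starting_col)
    let best := bBest grid dist
    if best < bInf grid then best else -1

-- ===== PRECONDITION & SPEC =====
-- Pre_ restricts to nonempty rectangular grids with a start index Python's grid[r][c] accepts
-- (negative = wraparound); outside it A usually raises IndexError, but on some ragged grids A
-- still returns while B's whole-grid relaxation indexes a missing cell and raises — those
-- shape-dependent traversals are excluded (see cites).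
def Pre_closest_carrot (grid : List (List String)) (starting_row : Int) (starting_col : Int) : Prop :=
  grid ≠ [] ∧ 0 < grid.headI.length ∧
  (∀ row ∈ grid, row.length = grid.headI.length) ∧
  -(grid.length : Int) ≤ starting_row ∧ starting_row < (grid.length : Int) ∧
  -(grid.headI.length : Int) ≤ starting_col ∧ starting_col < (grid.headI.length : Int)
instance (grid : List (List String)) (starting_row : Int) (starting_col : Int) : Decidable (Pre_closest_carrot grid starting_row starting_col) := by unfold Pre_closest_carrot; infer_instance

def pvWitness_closest_carrot : List (List String) × Int × Int := ([[".", "X"], ["C", "."]], 0, 0)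

def Spec_closest_carrot (grid : List (List String)) (starting_row : Int) (starting_col : Int) (out : Int) : Prop := out = closest_carrot_alt grid starting_row starting_col
instance (grid : List (List String)) (starting_row : Int) (starting_col : Int) (out : Int) : Decidable (Spec_closest_carrot grid starting_row starting_col out) := by unfold Spec_closest_carrot; infer_instance

-- ===== CLAIM (what is proved, stated in full; the proofs are below) =====
def Claim_equal_closest_carrot : Prop := ∀ (grid : List (List String)) (starting_row : Int) (starting_col : Int), Dom_closest_carrot grid starting_row starting_col → Pre_closest_carrot grid starting_row starting_col → Spec_closest_carrot grid starting_row starting_col (closest_carrot grid starting_row starting_col)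

-- ===== LEMMAS AND PROOFS =====

-- ---------- the layered BFS used as a middle point between the two ports ----------
-- B-side-style inner fold over an arbitrary candidate list
def ccFoldB (grid : List (List String)) (cs : List (Int × Int))
    (n : List (Int × Int)) (vis : PySem.Set (Int × Int)) :
    List (Int × Int) × PySem.Set (Int × Int) :=
  cs.foldl (fun st p =>
    if ccGuard grid st.2 p then (st.1 ++ [p], PySem.Set.add st.2 p) else st) (n, vis)

-- A's inner fold, generalized to an arbitrary candidate list
def ccFoldA (grid : List (List String)) (d : Int) (cs : List (Int × Int))
    (q : List (Int × Int × Int)) (vis : PySem.Set (Int × Int)) :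
    List (Int × Int × Int) × PySem.Set (Int × Int) :=
  cs.foldl (fun st p =>
    if ccGuard grid st.2 p then (st.1 ++ [(p.1, p.2, d)], PySem.Set.add st.2 p) else st) (q, vis)

-- one BFS layer: processes the frontier, collecting the next layer; (found C?, next, visited)
def ccInnerB (grid : List (List String)) :
    List (Int × Int) → List (Int × Int) → PySem.Set (Int × Int) →
    Bool × List (Int × Int) × PySem.Set (Int × Int)
  | [], next, visited => (false, next, visited)
  | (row, col) :: rest, next, visited =>
    if pvCell grid row col = "C" then (true, next, visited)
    else
      let st := ccFoldB grid (bCands row col) next visited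
      ccInnerB grid rest st.1 st.2

-- the layered BFS loop, one call per distance layer
def ccOuterB (grid : List (List String)) :
    Nat → List (Int × Int) → PySem.Set (Int × Int) → Int → Int
  | 0, _, _, _ => -1
  | fuel + 1, frontier, visited, distance =>
    if frontier = [] then -1
    else
      match ccInnerB grid frontier [] visited with
      | (true, _, _) => distance
      | (false, next, visited') => ccOuterB grid fuel next visited' (distance + 1)

lemma ccFoldA_eq (grid : List (List String)) (row col distance : Int)
    (q : List (Int × Int × Int)) (vis : PySem.Set (Int × Int)) :
    ([(1, 0), (-1, 0), (0, 1), (0, -1)] : List (Int × Int)).foldl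
      (fun (st : List (Int × Int × Int) × PySem.Set (Int × Int)) delta =>
        if ccGuard grid st.2 (row + delta.1, col + delta.2) then
          (st.1 ++ [(row + delta.1, col + delta.2, distance + 1)],
           PySem.Set.add st.2 (row + delta.1, col + delta.2))
        else st) (q, vis)
    = ccFoldA grid (distance + 1) (bCands row col) q vis := by
  simp only [ccFoldA, bCands, List.foldl_cons, List.foldl_nil, add_zero, ← sub_eq_add_neg]

lemma ccAdd_eq_append (vis : PySem.Set (Int × Int)) (p : Int × Int) (h : p ∉ vis) :
    PySem.Set.add vis p = vis ++ [p] := by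
  simp [PySem.Set.add, h]

-- both folds from the same visited set append the same fresh, in-box, non-'X' positions
lemma ccFold_spec (grid : List (List String)) (d : Int) :
    ∀ (cs : List (Int × Int)) (q : List (Int × Int × Int)) (n : List (Int × Int))
      (vis : PySem.Set (Int × Int)), ∃ adds : List (Int × Int),
      ccFoldB grid cs n vis = (n ++ adds, vis ++ adds) ∧
      ccFoldA grid d cs q vis = (q ++ adds.map (fun p => (p.1, p.2, d)), vis ++ adds) ∧
      (∀ p ∈ adds, ccInBox grid p) ∧ adds.Nodup ∧ (∀ p ∈ adds, p ∉ vis) ∧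
      (∀ p ∈ adds, pvCell grid p.1 p.2 ≠ "X" ∧ p ∈ cs) ∧
      (∀ p ∈ cs, ccInBox grid p → pvCell grid p.1 p.2 ≠ "X" → p ∈ vis ++ adds) := by
  intro cs
  induction cs with
  | nil =>
    intro q n vis
    exact ⟨[], by simp [ccFoldB], by simp [ccFoldA], by simp, by simp, by simp, by simp, by simp⟩
  | cons p cs ih =>
    intro q n vis
    by_cases hg : ccGuard grid vis p
    · have hnot : p ∉ vis := hg.2.2
      obtain ⟨adds, hB, hA, hbox, hnd, hfresh, hcellmem, hcover⟩ :=
        ih (q ++ [(p.1, p.2, d)]) (n ++ [p]) (vis ++ [p])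
      refine ⟨p :: adds, ?_, ?_, ?_, ?_, ?_, ?_, ?_⟩
      · simp only [ccFoldB, List.foldl_cons, if_pos hg]
        rw [ccAdd_eq_append vis p hnot]
        simpa [List.append_assoc] using hB
      · simp only [ccFoldA, List.foldl_cons, if_pos hg]
        rw [ccAdd_eq_append vis p hnot]
        simpa [List.append_assoc] using hA
      · intro x hx
        rcases List.mem_cons.mp hx with rfl | hx
        · exact hg.1
        · exact hbox x hx
      · exact List.nodup_cons.mpr ⟨fun hp => hfresh p hp (by simp), hnd⟩
      · intro x hx
        rcases List.mem_cons.mp hx with rfl | hx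
        · exact hnot
        · intro hv; exact hfresh x hx (by simp [hv])
      · intro x hx
        rcases List.mem_cons.mp hx with rfl | hx
        · exact ⟨hg.2.1, by simp⟩
        · exact ⟨(hcellmem x hx).1, List.mem_cons_of_mem _ (hcellmem x hx).2⟩
      · intro x hx hbx hcx
        rcases List.mem_cons.mp hx with rfl | hx
        · simp
        · have := hcover x hx hbx hcx
          simpa [List.append_assoc] using this
    · obtain ⟨adds, hB, hA, hbox, hnd, hfresh, hcellmem, hcover⟩ := ih q n vis
      refine ⟨adds, ?_, ?_, hbox, hnd, hfresh, ?_, ?_⟩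
      · simp only [ccFoldB, List.foldl_cons, if_neg hg]
        exact hB
      · simp only [ccFoldA, List.foldl_cons, if_neg hg]
        exact hA
      · intro x hx
        exact ⟨(hcellmem x hx).1, List.mem_cons_of_mem _ (hcellmem x hx).2⟩
      · intro x hx hbx hcx
        rcases List.mem_cons.mp hx with rfl | hx
        · have hv : x ∈ vis := by
            by_contra hv
            exact hg ⟨hbx, hcx, hv⟩
          exact List.mem_append_left _ hv
        · exact hcover x hx hbx hcx

-- size of the in-box part of the visited list
def ccBoxCount (grid : List (List String)) (vis : List (Int × Int)) : Nat :=
  (vis.filter (fun p => decide (ccInBox grid p))).length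

lemma ccBoxCount_le (grid : List (List String)) (vis : List (Int × Int)) (h : vis.Nodup) :
    ccBoxCount grid vis ≤ grid.length * nC grid := by
  unfold ccBoxCount
  have hnd : (vis.filter (fun p => decide (ccInBox grid p))).Nodup := h.filter _
  have hsub : (vis.filter (fun p => decide (ccInBox grid p))).toFinset ⊆
      (Finset.Icc (0 : Int) ((grid.length : Int) - 1)) ×ˢ
        (Finset.Icc (0 : Int) ((nC grid : Int) - 1)) := by
    intro x hx
    rw [List.mem_toFinset] at hx
    have hb := List.of_mem_filter hx
    simp only [decide_eq_true_eq] at hb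
    obtain ⟨h1, h2, h3, h4⟩ := hb
    simp only [Finset.mem_product, Finset.mem_Icc]
    simp only [pvRows, pvCols] at h2 h4
    omega
  have hcard : (vis.filter (fun p => decide (ccInBox grid p))).toFinset.card
      = (vis.filter (fun p => decide (ccInBox grid p))).length :=
    List.toFinset_card_of_nodup hnd
  have := Finset.card_le_card hsub
  rw [hcard, Finset.card_product, Int.card_Icc, Int.card_Icc] at this
  calc (vis.filter (fun p => decide (ccInBox grid p))).length
      ≤ ((grid.length : Int) - 1 + 1 - 0).toNat * ((nC grid : Int) - 1 + 1 - 0).toNat := this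
    _ = grid.length * nC grid := by simp

-- the termination measure shared by both simulations
def ccM (grid : List (List String)) (cur next : List (Int × Int)) (vis : List (Int × Int)) : Nat :=
  5 * (grid.length * nC grid - ccBoxCount grid vis) + cur.length + next.length

lemma ccLoopA_nil (grid : List (List String)) (fa : Nat) (vis : PySem.Set (Int × Int)) :
    ccLoopA grid fa [] vis = -1 := by
  cases fa <;> rfl

-- inner simulation: running A's queue loop through one whole layer matches ccInnerB
lemma ccInnerSim (grid : List (List String)) (d : Int) :
    ∀ (cur : List (Int × Int)) (fa : Nat) (next : List (Int × Int))
      (vis : PySem.Set (Int × Int)), vis.Nodup → ccM grid cur next vis ≤ fa →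
      (((ccInnerB grid cur next vis).1 = true →
          ccLoopA grid fa (cur.map (fun p => (p.1, p.2, d)) ++ next.map (fun p => (p.1, p.2, d + 1))) vis = d)
       ∧ ((ccInnerB grid cur next vis).1 = false →
          ccLoopA grid fa (cur.map (fun p => (p.1, p.2, d)) ++ next.map (fun p => (p.1, p.2, d + 1))) vis
            = ccLoopA grid (fa - cur.length)
                ((ccInnerB grid cur next vis).2.1.map (fun p => (p.1, p.2, d + 1)))
                (ccInnerB grid cur next vis).2.2
          ∧ (ccInnerB grid cur next vis).2.2.Nodup
          ∧ ccM grid [] (ccInnerB grid cur next vis).2.1 (ccInnerB grid cur next vis).2.2 + cur.length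
              ≤ ccM grid cur next vis)) := by
  intro cur
  induction cur with
  | nil =>
    intro fa next vis hnd hM
    constructor
    · intro h
      simp [ccInnerB] at h
    · intro _
      refine ⟨by simp [ccInnerB], by simpa [ccInnerB] using hnd, ?_⟩
      simp [ccInnerB, ccM]
  | cons hd rest ih =>
    obtain ⟨row, col⟩ := hd
    intro fa next vis hnd hM
    have hfa1 : 1 ≤ fa := by
      unfold ccM at hM
      simp only [List.length_cons] at hM
      omega
    obtain ⟨fa', rfl⟩ : ∃ fa', fa = fa' + 1 := ⟨fa - 1, by omega⟩
    by_cases hc : pvCell grid row col = "C"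
    · constructor
      · intro _
        simp only [List.map_cons, List.cons_append, ccLoopA, if_pos hc]
      · intro hfalse
        exfalso
        simp [ccInnerB, hc] at hfalse
    · obtain ⟨adds, hB, hA, hbox, hndadds, hfresh, hcellmem, hcover⟩ :=
        ccFold_spec grid (d + 1) (bCands row col)
          (rest.map (fun p => (p.1, p.2, d)) ++ next.map (fun p => (p.1, p.2, d + 1))) next vis
      have hInner : ccInnerB grid ((row, col) :: rest) next vis
          = ccInnerB grid rest (next ++ adds) (vis ++ adds) := by
        simp only [ccInnerB, if_neg hc]
        rw [hB]
      have hvis' : (vis ++ adds).Nodup :=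
        List.Nodup.append hnd hndadds (fun x hx hx2 => hfresh x hx2 hx)
      have hcount : ccBoxCount grid (vis ++ adds) = ccBoxCount grid vis + adds.length := by
        unfold ccBoxCount
        rw [List.filter_append, List.length_append]
        congr 1
        rw [List.length_filter_eq_length_iff]
        intro p hp
        simpa using hbox p hp
      have hle := ccBoxCount_le grid (vis ++ adds) hvis'
      have hMstep : ccM grid rest (next ++ adds) (vis ++ adds) + 1
          ≤ ccM grid ((row, col) :: rest) next vis := by
        unfold ccM
        rw [hcount]
        simp only [List.length_append, List.length_cons]
        rw [hcount] at hle
        omega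
      have hAstep : ccLoopA grid (fa' + 1)
          (((row, col) :: rest).map (fun p => (p.1, p.2, d)) ++ next.map (fun p => (p.1, p.2, d + 1))) vis
          = ccLoopA grid fa'
              (rest.map (fun p => (p.1, p.2, d)) ++ (next ++ adds).map (fun p => (p.1, p.2, d + 1)))
              (vis ++ adds) := by
        simp only [List.map_cons, List.cons_append, ccLoopA, if_neg hc]
        rw [ccFoldA_eq, hA]
        congr 1
        simp [List.map_append, List.append_assoc]
      have ihs := ih fa' (next ++ adds) (vis ++ adds) hvis' (by omega)
      constructor
      · intro htrue
        rw [hInner] at htrue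
        rw [hAstep]
        exact ihs.1 htrue
      · intro hfalse
        rw [hInner] at hfalse
        obtain ⟨heq, hnd2, hM2⟩ := ihs.2 hfalse
        refine ⟨?_, by rw [hInner]; exact hnd2, ?_⟩
        · rw [hAstep, hInner]
          have hfuel : fa' + 1 - ((row, col) :: rest).length = fa' - rest.length := by
            simp
          rw [hfuel]
          exact heq
        · rw [hInner]
          calc ccM grid [] (ccInnerB grid rest (next ++ adds) (vis ++ adds)).2.1
                  (ccInnerB grid rest (next ++ adds) (vis ++ adds)).2.2 + ((row, col) :: rest).length
              = (ccM grid [] _ _ + rest.length) + 1 := by simp [List.length_cons]; ring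
            _ ≤ ccM grid rest (next ++ adds) (vis ++ adds) + 1 := by omega
            _ ≤ ccM grid ((row, col) :: rest) next vis := hMstep

-- outer simulation: A's queue loop equals the layered BFS loop
lemma ccOuterSim (grid : List (List String)) :
    ∀ (fb : Nat) (frontier : List (Int × Int)) (vis : PySem.Set (Int × Int)) (d : Int) (fa : Nat),
      vis.Nodup → ccM grid frontier [] vis ≤ fa → ccM grid frontier [] vis ≤ fb →
      ccLoopA grid fa (frontier.map (fun p => (p.1, p.2, d))) vis = ccOuterB grid fb frontier vis d := by
  intro fb
  induction fb with
  | zero =>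
    intro frontier vis d fa hnd hfa hfb
    have hfe : frontier = [] := by
      unfold ccM at hfb
      cases frontier with
      | nil => rfl
      | cons a l => simp only [List.length_cons] at hfb; omega
    subst hfe
    simp [ccLoopA_nil, ccOuterB]
  | succ fb ih =>
    intro frontier vis d fa hnd hfa hfb
    cases frontier with
    | nil => simp [ccLoopA_nil, ccOuterB]
    | cons p rest =>
      have hin := ccInnerSim grid d (p :: rest) fa [] vis hnd (by simpa using hfa)
      simp only [ccOuterB]
      rw [if_neg (by simp : ¬ (p :: rest) = [])]
      rcases hI : ccInnerB grid (p :: rest) [] vis with ⟨b, next', vis'⟩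
      rw [hI] at hin
      cases b
      · obtain ⟨heq, hnd', hM'⟩ := hin.2 rfl
        have hM2 : ccM grid [] next' vis' + (p :: rest).length ≤ ccM grid (p :: rest) [] vis := hM'
        have hndv : vis'.Nodup := hnd'
        simp only [List.map_nil, List.append_nil] at heq
        rw [heq]
        have hMf : ccM grid next' [] vis' = ccM grid [] next' vis' := by
          unfold ccM; omega
        have hlen : ccM grid (p :: rest) [] vis ≥ (p :: rest).length := by
          unfold ccM; omega
        exact ih next' vis' (d + 1) (fa - (p :: rest).length) hndv
          (by rw [hMf]; simp only [List.length_cons] at hM2 ⊢; omega)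
          (by rw [hMf]; simp only [List.length_cons] at hlen hM2 ⊢; omega)
      · have := hin.1 rfl
        simpa using this

-- ---------- reachability layers ----------
abbrev ccAllowed (grid : List (List String)) (p : Int × Int) : Prop :=
  ccInBox grid p ∧ pvCell grid p.1 p.2 ≠ "X"

-- rp grid s k p: p is an allowed cell reachable from the start s in 1..k steps
def rp (grid : List (List String)) (s : Int × Int) : Nat → Int × Int → Bool
  | 0, _ => false
  | k + 1, p => rp grid s k p ||
      (decide (ccAllowed grid p) && (bCands p.1 p.2).any (fun q => q == s || rp grid s k q))

-- cells visited by the BFS within k layers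
def RkP (grid : List (List String)) (s : Int × Int) (k : Nat) (p : Int × Int) : Prop :=
  p = s ∨ rp grid s k p = true

-- a carrot cell among the first k BFS layers
def hasC (grid : List (List String)) (s : Int × Int) (k : Nat) : Prop :=
  ∃ p, RkP grid s k p ∧ pvCell grid p.1 p.2 = "C"

-- first reachability index as an Int-valued distance (bInf if not reached within k)
def phiF (grid : List (List String)) (s : Int × Int) : Nat → Int × Int → Int
  | 0, _ => bInf grid
  | k + 1, p =>
      if phiF grid s k p < bInf grid then phiF grid s k p
      else if rp grid s (k + 1) p then ((k : Int) + 1) else bInf grid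

def phiGrid (grid : List (List String)) (s : Int × Int) (k : Nat) : List (List Int) :=
  (List.range grid.length).map (fun (r : Nat) =>
    (List.range (nC grid)).map (fun (c : Nat) => phiF grid s k ((r : Int), (c : Int))))


lemma mem_bCands_comm (a b : Int × Int) : a ∈ bCands b.1 b.2 ↔ b ∈ bCands a.1 a.2 := by
  simp only [bCands, List.mem_cons, List.not_mem_nil, or_false, Prod.ext_iff]
  constructor <;> (intro h; rcases h with ⟨h1, h2⟩ | ⟨h1, h2⟩ | ⟨h1, h2⟩ | ⟨h1, h2⟩) <;> omega

lemma rp_succ (grid : List (List String)) (s : Int × Int) (k : Nat) (p : Int × Int) :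
    rp grid s (k + 1) p = true ↔
    rp grid s k p = true ∨
      (ccAllowed grid p ∧ ∃ q ∈ bCands p.1 p.2, q = s ∨ rp grid s k q = true) := by
  simp [rp, List.any_eq_true, Bool.or_eq_true, beq_iff_eq, decide_eq_true_eq]

lemma rp_mono (grid : List (List String)) (s : Int × Int) {j k : Nat} (h : j ≤ k)
    {p : Int × Int} (hp : rp grid s j p = true) : rp grid s k p = true := by
  induction k with
  | zero =>
    have hj : j = 0 := Nat.le_zero.mp h
    subst hj; exact hp
  | succ k ih =>
    by_cases h' : j = k + 1
    · subst h'; exact hp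
    · exact (rp_succ grid s k p).mpr (Or.inl (ih (by omega)))

lemma rp_allowed (grid : List (List String)) (s : Int × Int) {k : Nat} {p : Int × Int}
    (hp : rp grid s k p = true) : ccAllowed grid p := by
  induction k with
  | zero => simp [rp] at hp
  | succ k ih =>
    rcases (rp_succ grid s k p).mp hp with h | h
    · exact ih h
    · exact h.1

lemma rp_seed (grid : List (List String)) (s : Int × Int) {p : Int × Int}
    (hall : ccAllowed grid p) (hs : s ∈ bCands p.1 p.2) {k : Nat} (hk : 1 ≤ k) :
    rp grid s k p = true := by
  have h1 : rp grid s 1 p = true :=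
    (rp_succ grid s 0 p).mpr (Or.inr ⟨hall, s, hs, Or.inl rfl⟩)
  exact rp_mono grid s hk h1

lemma rp_step_congr (grid : List (List String)) (s : Int × Int) {a b : Nat}
    (h : ∀ p, rp grid s a p = rp grid s b p) (p : Int × Int) :
    rp grid s (a + 1) p = rp grid s (b + 1) p := by
  simp only [rp, h]

lemma rp_stall (grid : List (List String)) (s : Int × Int) {k : Nat}
    (h : ∀ p, rp grid s (k + 1) p = rp grid s k p) :
    ∀ j, k ≤ j → ∀ p, rp grid s j p = rp grid s k p := by
  intro j
  induction j with
  | zero =>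
    intro hj p
    have hk : k = 0 := Nat.le_zero.mp hj
    subst hk; rfl
  | succ j ih =>
    intro hj p
    by_cases h' : k = j + 1
    · rw [h']
    · exact (rp_step_congr grid s (ih (by omega)) p).trans (h p)

def boxFS (grid : List (List String)) : Finset (Int × Int) :=
  (Finset.range grid.length ×ˢ Finset.range (nC grid)).image
    (fun rc => ((rc.1 : Int), (rc.2 : Int)))

lemma mem_boxFS (grid : List (List String)) (p : Int × Int) :
    p ∈ boxFS grid ↔ ccInBox grid p := by
  simp only [boxFS, Finset.mem_image, Finset.mem_product, Finset.mem_range]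
  constructor
  · rintro ⟨⟨r, c⟩, ⟨hr, hc⟩, rfl⟩
    simp only [ccInBox, pvRows, pvCols]
    omega
  · rintro ⟨h1, h2, h3, h4⟩
    refine ⟨(p.1.toNat, p.2.toNat), ⟨?_, ?_⟩, ?_⟩
    · simp only [pvRows] at h2; omega
    · simp only [pvCols] at h4; omega
    · cases p with
      | mk a b =>
        simp only [Prod.ext_iff]
        constructor <;> simp <;> omega

lemma card_boxFS (grid : List (List String)) :
    (boxFS grid).card = grid.length * nC grid := by
  rw [boxFS, Finset.card_image_of_injective, Finset.card_product,
    Finset.card_range, Finset.card_range]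
  rintro ⟨a1, a2⟩ ⟨b1, b2⟩ h
  simp only [Prod.ext_iff] at h ⊢
  exact ⟨by exact_mod_cast h.1, by exact_mod_cast h.2⟩

def Sfin (grid : List (List String)) (s : Int × Int) (k : Nat) : Finset (Int × Int) :=
  (boxFS grid).filter (fun p => rp grid s k p = true)

lemma mem_Sfin (grid : List (List String)) (s : Int × Int) (k : Nat) (p : Int × Int) :
    p ∈ Sfin grid s k ↔ rp grid s k p = true := by
  simp only [Sfin, Finset.mem_filter, mem_boxFS]
  constructor
  · exact fun h => h.2
  · intro h; exact ⟨(rp_allowed grid s h).1, h⟩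

lemma Sfin_card_growth (grid : List (List String)) (s : Int × Int) {k : Nat}
    (hw : ∃ p, rp grid s (k + 1) p = true ∧ rp grid s k p = false) :
    (Sfin grid s k).card < (Sfin grid s (k + 1)).card := by
  obtain ⟨p, hp1, hp0⟩ := hw
  refine Finset.card_lt_card ⟨?_, ?_⟩
  · intro x hx
    exact (mem_Sfin _ _ _ _).mpr (rp_mono grid s (Nat.le_succ k) ((mem_Sfin _ _ _ _).mp hx))
  · intro hsub
    have := (mem_Sfin _ _ _ _).mp (hsub ((mem_Sfin _ _ _ _).mpr hp1))
    rw [hp0] at this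
    exact Bool.false_ne_true this

lemma Sfin_card_ge (grid : List (List String)) (s : Int × Int) (j : Nat)
    (h : ∀ i, i < j → ∃ p, rp grid s (i + 1) p = true ∧ rp grid s i p = false) :
    j ≤ (Sfin grid s j).card := by
  induction j with
  | zero => exact Nat.zero_le _
  | succ j ih =>
    have h1 := ih (fun i hi => h i (by omega))
    have h2 := Sfin_card_growth grid s (h j (by omega))
    omega

lemma not_stall_witness (grid : List (List String)) (s : Int × Int) {i : Nat}
    (h : ∃ p, rp grid s (i + 1) p ≠ rp grid s i p) :
    ∃ p, rp grid s (i + 1) p = true ∧ rp grid s i p = false := by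
  obtain ⟨p, hp⟩ := h
  cases h0 : rp grid s i p with
  | true => exact absurd ((rp_mono grid s (Nat.le_succ i) h0).trans h0.symm) hp
  | false =>
    cases h1 : rp grid s (i + 1) p with
    | true => exact ⟨p, h1, h0⟩
    | false => exact absurd (h1.trans h0.symm) hp

-- a fresh cell at level j + 1 forces strict growth at every earlier level
lemma rp_new_le (grid : List (List String)) (s : Int × Int) {j : Nat} {p : Int × Int}
    (hp : rp grid s (j + 1) p = true) (hnp : rp grid s j p = false) :
    j + 1 ≤ grid.length * nC grid := by
  have hnostall : ∀ i, i < j + 1 → ∃ q, rp grid s (i + 1) q ≠ rp grid s i q := by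
    intro i hi
    by_contra hc
    push_neg at hc
    have hst : ∀ q, rp grid s (i + 1) q = rp grid s i q := hc
    have hj := rp_stall grid s hst j (by omega) p
    have hj1 := rp_stall grid s hst (j + 1) (by omega) p
    rw [hp] at hj1
    rw [hnp] at hj
    exact Bool.false_ne_true (hj.trans hj1.symm)
  have h1 := Sfin_card_ge grid s (j + 1)
    (fun i hi => not_stall_witness grid s (hnostall i hi))
  have h2 : (Sfin grid s (j + 1)).card ≤ (boxFS grid).card :=
    Finset.card_filter_le _ _
  rw [card_boxFS] at h2
  omega

lemma exists_stall (grid : List (List String)) (s : Int × Int) :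
    ∃ i, i ≤ grid.length * nC grid ∧ ∀ p, rp grid s (i + 1) p = rp grid s i p := by
  by_contra h
  push_neg at h
  have h1 := Sfin_card_ge grid s (grid.length * nC grid + 1)
    (fun i hi => not_stall_witness grid s (h i (by omega)))

  have h2 : (Sfin grid s (grid.length * nC grid + 1)).card ≤ (boxFS grid).card :=
    Finset.card_filter_le _ _
  rw [card_boxFS] at h2
  omega

lemma rp_ge_stab (grid : List (List String)) (s : Int × Int) :
    ∀ j, grid.length * nC grid ≤ j → ∀ p,
      rp grid s j p = rp grid s (grid.length * nC grid) p := by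
  obtain ⟨i, hi, hst⟩ := exists_stall grid s
  intro j hj p
  exact (rp_stall grid s hst j (by omega) p).trans
    (rp_stall grid s hst (grid.length * nC grid) (by omega) p).symm

lemma bInf_eq (grid : List (List String)) :
    bInf grid = ((grid.length * nC grid : Nat) : Int) + 1 := by
  simp only [bInf, pvRows, pvCols]
  push_cast
  ring

lemma phi_lt_inf_iff (grid : List (List String)) (s : Int × Int) (k : Nat) (p : Int × Int) :
    phiF grid s k p < bInf grid ↔ rp grid s k p = true := by
  induction k with
  | zero => simp [phiF, rp]
  | succ k ih =>
    simp only [phiF]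
    split_ifs with h1 h2
    · simp only [h1, true_iff]
      exact rp_mono grid s (Nat.le_succ k) (ih.mp h1)
    · simp only [h2, iff_true]
      rcases hk : rp grid s k p with _ | _
      · have hle := rp_new_le grid s (j := k) h2 hk
        rw [bInf_eq]
        push_cast
        omega
      · exact absurd (ih.mpr hk) h1
    · simp only [lt_self_iff_false, false_iff]
      exact fun hc => h2 hc

lemma phi_le_inf (grid : List (List String)) (s : Int × Int) (k : Nat) (p : Int × Int) :
    phiF grid s k p ≤ bInf grid := by
  induction k with
  | zero => simp [phiF]
  | succ k ih =>
    simp only [phiF]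
    split_ifs with h1 h2
    · exact le_of_lt h1
    · cases hk : rp grid s k p with
      | true => exact absurd ((phi_lt_inf_iff grid s k p).mpr hk) h1
      | false =>
        have hle := rp_new_le grid s (j := k) h2 hk
        rw [bInf_eq]
        push_cast
        omega
    · exact le_rfl


lemma bool_eq_of_iff {a b : Bool} (h : a = true ↔ b = true) : a = b := by
  cases a <;> cases b <;> simp_all

lemma phi_not_allowed (grid : List (List String)) (s : Int × Int) (p : Int × Int)
    (hna : ¬ ccAllowed grid p) (k : Nat) : phiF grid s k p = bInf grid := by
  induction k with
  | zero => rfl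
  | succ k ih =>
    rw [phiF, ih, if_neg (lt_irrefl _)]
    cases hk : rp grid s (k + 1) p with
    | true => exact absurd (rp_allowed grid s hk) hna
    | false => simp

lemma phi_spec (grid : List (List String)) (s : Int × Int) (k : Nat) (p : Int × Int)
    (h : phiF grid s k p < bInf grid) :
    ∃ j : Nat, phiF grid s k p = (j : Int) ∧ 1 ≤ j ∧ j ≤ k ∧ rp grid s j p = true ∧
      ∀ i, i < j → rp grid s i p = false := by
  induction k with
  | zero => simp [phiF] at h
  | succ k ih =>
    rw [phiF] at h ⊢
    split_ifs at h ⊢ with h1 h2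
    · obtain ⟨j, e, hj1, hjk, hrp, hmin⟩ := ih h1
      exact ⟨j, e, hj1, by omega, hrp, hmin⟩
    · refine ⟨k + 1, by push_cast; ring, by omega, le_rfl, h2, ?_⟩
      intro i hi
      cases hri : rp grid s i p with
      | true =>
        exact absurd ((phi_lt_inf_iff grid s k p).mpr (rp_mono grid s (by omega) hri)) h1
      | false => rfl
    · exact absurd h (lt_irrefl _)

lemma phi_le_of_rp (grid : List (List String)) (s : Int × Int) {j k : Nat} {p : Int × Int}
    (hj : rp grid s j p = true) (hjk : j ≤ k) : phiF grid s k p ≤ (j : Int) := by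
  induction k with
  | zero =>
    have h0 : j = 0 := by omega
    subst h0
    simp [rp] at hj
  | succ k ih =>
    rw [phiF]
    by_cases hjk' : j ≤ k
    · have hk : rp grid s k p = true := rp_mono grid s hjk' hj
      rw [if_pos ((phi_lt_inf_iff grid s k p).mpr hk)]
      exact ih hjk'
    · have hj' : j = k + 1 := by omega
      subst hj'
      by_cases h1 : phiF grid s k p < bInf grid
      · rw [if_pos h1]
        obtain ⟨j', e, _, hj'k, _, _⟩ := phi_spec grid s k p h1
        rw [e]
        push_cast
        omega
      · rw [if_neg h1, if_pos hj]
        push_cast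
        omega

lemma phi_succ_le (grid : List (List String)) (s : Int × Int) (k : Nat) (p : Int × Int) :
    phiF grid s (k + 1) p ≤ phiF grid s k p := by
  rw [phiF]
  split_ifs with h1 h2
  · exact le_rfl
  · have he : phiF grid s k p = bInf grid :=
      le_antisymm (phi_le_inf grid s k p) (not_lt.mp h1)
    rw [he]
    cases hk : rp grid s k p with
    | true => exact absurd ((phi_lt_inf_iff grid s k p).mpr hk) h1
    | false =>
      have hle := rp_new_le grid s (j := k) h2 hk
      rw [bInf_eq]
      push_cast
      omega
  · exact not_lt.mp h1

lemma phi_stall (grid : List (List String)) (s : Int × Int) {k : Nat}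
    (h : ∀ p, rp grid s (k + 1) p = rp grid s k p) :
    ∀ j, k ≤ j → ∀ p, phiF grid s j p = phiF grid s k p := by
  intro j
  induction j with
  | zero =>
    intro hj p
    have hk : k = 0 := Nat.le_zero.mp hj
    subst hk; rfl
  | succ j ih =>
    intro hj p
    by_cases h' : k = j + 1
    · rw [h']
    · have hkj : k ≤ j := by omega
      have hrpj : rp grid s (j + 1) p = rp grid s k p :=
        (rp_stall grid s h (j + 1) (by omega) p).trans (rp_stall grid s h k le_rfl p).symm
      rw [phiF, ih hkj]
      by_cases h1 : phiF grid s k p < bInf grid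
      · rw [if_pos h1]
      · rw [if_neg h1]
        have hnk : rp grid s k p = false := by
          cases hk : rp grid s k p with
          | true => exact absurd ((phi_lt_inf_iff grid s k p).mpr hk) h1
          | false => rfl
        rw [hrpj, hnk]
        simp only [Bool.false_eq_true, if_false]
        exact (le_antisymm (phi_le_inf grid s k p) (not_lt.mp h1)).symm

lemma bGet_phiGrid (grid : List (List String)) (s : Int × Int) (k : Nat) (r c : Int)
    (h1 : 0 ≤ r) (h2 : r < pvRows grid) (h3 : 0 ≤ c) (h4 : c < pvCols grid) :
    bGet (phiGrid grid s k) r c = phiF grid s k (r, c) := by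
  obtain ⟨a, rfl⟩ : ∃ a : Nat, r = (a : Int) := ⟨r.toNat, (Int.toNat_of_nonneg h1).symm⟩
  obtain ⟨b, rfl⟩ : ∃ b : Nat, c = (b : Int) := ⟨c.toNat, (Int.toNat_of_nonneg h3).symm⟩
  have ha : a < grid.length := by simp only [pvRows] at h2; exact_mod_cast h2
  have hb : b < nC grid := by simp only [pvCols] at h4; exact_mod_cast h4
  simp [bGet, phiGrid, PySem.List.pyGet?_natCast, List.getElem?_map, List.getElem?_range, ha, hb]

lemma grid_ext (grid : List (List String)) (d : List (List Int)) (f : Int × Int → Int)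
    (h1 : d.length = grid.length)
    (h2 : ∀ i, (hi : i < d.length) → d[i].length = nC grid)
    (h3 : ∀ r c : Nat, r < grid.length → c < nC grid →
      d[r]?.bind (fun row => row[c]?) = some (f ((r : Int), (c : Int)))) :
    d = (List.range grid.length).map (fun (r : Nat) =>
      (List.range (nC grid)).map (fun (c : Nat) => f ((r : Int), (c : Int)))) := by
  apply List.ext_getElem?
  intro n
  by_cases hn : n < grid.length
  · have hd : n < d.length := by omega
    rw [List.getElem?_eq_getElem hd]
    have hrhs : ((List.range grid.length).map (fun (r : Nat) =>
        (List.range (nC grid)).map (fun (c : Nat) => f ((r : Int), (c : Int)))))[n]?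
        = some ((List.range (nC grid)).map (fun (c : Nat) => f ((n : Int), (c : Int)))) := by
      simp [List.getElem?_map, List.getElem?_range, hn]
    rw [hrhs]
    refine congrArg some ?_
    apply List.ext_getElem?
    intro m
    by_cases hm : m < nC grid
    · have h3' := h3 n m hn hm
      rw [List.getElem?_eq_getElem hd] at h3'
      have h3'' : d[n][m]? = some (f ((n : Int), (m : Int))) := h3'
      rw [h3'']
      simp [List.getElem?_map, List.getElem?_range, hm]
    · rw [List.getElem?_eq_none (by rw [h2 n hd]; omega),
        List.getElem?_eq_none (by simp; omega)]
  · rw [List.getElem?_eq_none (by omega), List.getElem?_eq_none (by simp; omega)]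

-- ---------- the seeding fold ----------
def sgRead (g : List (List Int)) (r c : Nat) : Option Int := g[r]?.bind (fun row => row[c]?)

abbrev sgShape (grid : List (List String)) (g : List (List Int)) : Prop :=
  g.length = grid.length ∧ ∀ (i : Nat) (row : List Int), g[i]? = some row → row.length = nC grid

def sgUpd (grid : List (List String)) (g : List (List Int)) (p : Int × Int) : List (List Int) :=
  if ccInBox grid p ∧ pvCell grid p.1 p.2 ≠ "X" then
    g.modify p.1.toNat (fun row => row.set p.2.toNat 1)
  else g

lemma sgUpd_shape (grid : List (List String)) (g : List (List Int)) (p : Int × Int)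
    (hs : sgShape grid g) : sgShape grid (sgUpd grid g p) := by
  unfold sgUpd
  split_ifs with hg
  · constructor
    · rw [List.length_modify]; exact hs.1
    · intro i row hrow
      rw [List.getElem?_modify] at hrow
      cases hgi : g[i]? with
      | none =>
        rw [hgi] at hrow
        simp at hrow
      | some row0 =>
        rw [hgi] at hrow
        have hrow3 : (if p.1.toNat = i then row0.set p.2.toNat 1 else row0) = row :=
          Option.some.inj hrow
        rw [← hrow3]
        split_ifs
        · rw [List.length_set]; exact hs.2 i row0 hgi
        · exact hs.2 i row0 hgi
  · exact hs

lemma sgRead_upd (grid : List (List String)) (g : List (List Int)) (p : Int × Int)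
    (hs : sgShape grid g) (r c : Nat) (hr : r < grid.length) (hc : c < nC grid) :
    sgRead (sgUpd grid g p) r c =
      if (ccInBox grid p ∧ pvCell grid p.1 p.2 ≠ "X") ∧ p = ((r : Int), (c : Int))
      then some 1 else sgRead g r c := by
  unfold sgUpd sgRead
  by_cases hg : ccInBox grid p ∧ pvCell grid p.1 p.2 ≠ "X"
  · rw [if_pos hg]
    have hrg : r < g.length := by have := hs.1; omega
    have hlen := hs.2 r g[r] (List.getElem?_eq_getElem hrg)
    by_cases hp : p = ((r : Int), (c : Int))
    · rw [if_pos ⟨hg, hp⟩]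
      have ha : p.1.toNat = r := by rw [hp]; simp
      have hb : p.2.toNat = c := by rw [hp]; simp
      rw [List.getElem?_modify, List.getElem?_eq_getElem hrg]
      simp [ha, hb, List.getElem?_set, hlen, hc]
    · rw [if_neg (by intro hcon; exact hp hcon.2)]
      have h0a : 0 ≤ p.1 := hg.1.1
      have h0b : 0 ≤ p.2 := hg.1.2.2.1
      rw [List.getElem?_modify, List.getElem?_eq_getElem hrg]
      by_cases ha : p.1.toNat = r
      · have hb : p.2.toNat ≠ c := by
          intro hb
          apply hp
          have e1 : p.1 = (r : Int) := by omega
          have e2 : p.2 = (c : Int) := by omega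
          cases p with
          | mk x y => simpa [Prod.ext_iff] using ⟨e1, e2⟩
        simp [ha, List.getElem?_set, hb]
      · simp [ha]
  · rw [if_neg hg, if_neg (by intro hcon; exact hg hcon.1)]

lemma sgRead_fold (grid : List (List String)) :
    ∀ (cs : List (Int × Int)) (g : List (List Int)), sgShape grid g →
      sgShape grid (cs.foldl (sgUpd grid) g) ∧
      ∀ r c : Nat, r < grid.length → c < nC grid →
        sgRead (cs.foldl (sgUpd grid) g) r c =
          if ∃ p ∈ cs, (ccInBox grid p ∧ pvCell grid p.1 p.2 ≠ "X") ∧ p = ((r : Int), (c : Int))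
          then some 1 else sgRead g r c := by
  intro cs
  induction cs with
  | nil =>
    intro g hs
    exact ⟨hs, fun r c _ _ => by simp⟩
  | cons p cs ih =>
    intro g hs
    obtain ⟨hsh, hread⟩ := ih (sgUpd grid g p) (sgUpd_shape grid g p hs)
    refine ⟨hsh, ?_⟩
    intro r c hr hc
    rw [List.foldl_cons, hread r c hr hc, sgRead_upd grid g p hs r c hr hc]
    by_cases hcs : ∃ q ∈ cs, (ccInBox grid q ∧ pvCell grid q.1 q.2 ≠ "X") ∧ q = ((r : Int), (c : Int))
    · rw [if_pos hcs, if_pos (by obtain ⟨q, hq, hqq⟩ := hcs; exact ⟨q, List.mem_cons_of_mem _ hq, hqq⟩)]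
    · rw [if_neg hcs]
      by_cases hp : (ccInBox grid p ∧ pvCell grid p.1 p.2 ≠ "X") ∧ p = ((r : Int), (c : Int))
      · rw [if_pos hp, if_pos ⟨p, List.mem_cons_self, hp⟩]
      · rw [if_neg hp, if_neg ?_]
        rintro ⟨q, hq, hqq⟩
        rcases List.mem_cons.mp hq with rfl | hq'
        · exact hp hqq
        · exact hcs ⟨q, hq', hqq⟩

lemma phi_one (grid : List (List String)) (s : Int × Int) (p : Int × Int) :
    phiF grid s 1 p = if rp grid s 1 p then 1 else bInf grid := by
  rw [phiF]
  rw [show phiF grid s 0 p = bInf grid from rfl, if_neg (lt_irrefl _)]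
  rfl

lemma rp_one_iff (grid : List (List String)) (s : Int × Int) (p : Int × Int) :
    rp grid s 1 p = true ↔ ccAllowed grid p ∧ s ∈ bCands p.1 p.2 := by
  rw [rp_succ]
  constructor
  · rintro (h | ⟨hall, q, hq, (rfl | h)⟩)
    · simp [rp] at h
    · exact ⟨hall, hq⟩
    · simp [rp] at h
  · rintro ⟨hall, hs⟩
    exact Or.inr ⟨hall, s, hs, Or.inl rfl⟩

lemma bSeed_phi (grid : List (List String)) (sr sc : Int) :
    bSeed grid sr sc = phiGrid grid (sr, sc) 1 := by
  have hinit : sgShape grid (List.replicate grid.length (List.replicate (nC grid) (bInf grid))) := by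
    constructor
    · simp
    · intro i row hrow
      rw [List.getElem?_replicate] at hrow
      by_cases hi : i < grid.length
      · rw [if_pos hi] at hrow
        cases hrow
        simp
      · rw [if_neg hi] at hrow
        simp at hrow
  obtain ⟨hsh, hread⟩ := sgRead_fold grid (bCands sr sc) _ hinit
  have : bSeed grid sr sc = (bCands sr sc).foldl (sgUpd grid)
      (List.replicate grid.length (List.replicate (nC grid) (bInf grid))) := rfl
  rw [this]
  apply grid_ext grid _ (phiF grid (sr, sc) 1) hsh.1
  · intro i hi
    have := hsh.2 i _ (List.getElem?_eq_getElem hi)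
    exact this
  · intro r c hr hc
    have hinitread : sgRead (List.replicate grid.length (List.replicate (nC grid) (bInf grid))) r c
        = some (bInf grid) := by
      unfold sgRead
      rw [List.getElem?_replicate, if_pos hr, Option.bind_some, List.getElem?_replicate, if_pos hc]
    show sgRead ((bCands sr sc).foldl (sgUpd grid)
      (List.replicate grid.length (List.replicate (nC grid) (bInf grid)))) r c
      = some (phiF grid (sr, sc) 1 ((r : Int), (c : Int)))
    rw [hread r c hr hc, hinitread, phi_one]
    by_cases hcond : ∃ p ∈ bCands sr sc,
        (ccInBox grid p ∧ pvCell grid p.1 p.2 ≠ "X") ∧ p = ((r : Int), (c : Int))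
    · rw [if_pos hcond]
      obtain ⟨p, hp, hpg, rfl⟩ := hcond
      have hrp : rp grid (sr, sc) 1 ((r : Int), (c : Int)) = true := by
        rw [rp_one_iff]
        exact ⟨hpg, (mem_bCands_comm (sr, sc) _).mpr hp⟩
      rw [if_pos hrp]
    · rw [if_neg hcond]
      cases hrp : rp grid (sr, sc) 1 ((r : Int), (c : Int)) with
      | true =>
        obtain ⟨hall, hs⟩ := (rp_one_iff grid (sr, sc) _).mp hrp
        exact absurd ⟨((r : Int), (c : Int)),
          (mem_bCands_comm ((r : Int), (c : Int)) (sr, sc)).mpr hs, hall, rfl⟩ hcond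
      | false => simp

lemma bStep_phi (grid : List (List String)) (s : Int × Int) (k : Nat) (hk : 1 ≤ k) :
    bStep grid (phiGrid grid s k) = phiGrid grid s (k + 1) := by
  conv_rhs => rw [phiGrid]
  rw [bStep]
  apply List.map_congr_left
  intro r hr
  apply List.map_congr_left
  intro c hc
  rw [List.mem_range] at hr hc
  have hb1 : (0 : Int) ≤ (r : Int) := Int.natCast_nonneg r
  have hb2 : (r : Int) < pvRows grid := by simp only [pvRows]; exact_mod_cast hr
  have hb3 : (0 : Int) ≤ (c : Int) := Int.natCast_nonneg c
  have hb4 : (c : Int) < pvCols grid := by simp only [pvCols]; exact_mod_cast hc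
  have hbox : ccInBox grid ((r : Int), (c : Int)) := ⟨hb1, hb2, hb3, hb4⟩
  by_cases hX : pvCell grid (r : Int) (c : Int) = "X"
  · rw [if_pos hX, bGet_phiGrid grid s k _ _ hb1 hb2 hb3 hb4]
    have hna : ¬ ccAllowed grid ((r : Int), (c : Int)) := fun hall => hall.2 hX
    rw [phi_not_allowed grid s _ hna k, phi_not_allowed grid s _ hna (k + 1)]
  · rw [if_neg hX]
    have hall : ccAllowed grid ((r : Int), (c : Int)) := ⟨hbox, hX⟩
    rw [List.singleton_append, bGet_phiGrid grid s k _ _ hb1 hb2 hb3 hb4]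
    set rest := (bCands (r : Int) (c : Int)).filterMap (fun p =>
      if ccInBox grid p then some (bGet (phiGrid grid s k) p.1 p.2 + 1) else none) with hrest_def
    have hsome : PySem.List.min? (phiF grid s k ((r : Int), (c : Int)) :: rest) (fun y => y)
        = some (rest.foldl min (phiF grid s k ((r : Int), (c : Int)))) :=
      PySem.List.min?_id_cons _ _
    rw [hsome, Option.getD_some]
    have hrest : ∀ y ∈ rest, ∃ q, q ∈ bCands (r : Int) (c : Int) ∧ ccInBox grid q ∧
        y = phiF grid s k q + 1 := by
      intro y hy
      rw [hrest_def, List.mem_filterMap] at hy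
      obtain ⟨q, hq, he⟩ := hy
      by_cases hbq : ccInBox grid q
      · rw [if_pos hbq] at he
        refine ⟨q, hq, hbq, ?_⟩
        have := bGet_phiGrid grid s k q.1 q.2 hbq.1 hbq.2.1 hbq.2.2.1 hbq.2.2.2
        rw [Prod.mk.eta] at this
        rw [← Option.some_inj.mp he, this]
      · rw [if_neg hbq] at he
        cases he
    have hA : ∀ y ∈ phiF grid s k ((r : Int), (c : Int)) :: rest,
        phiF grid s (k + 1) ((r : Int), (c : Int)) ≤ y := by
      intro y hy
      rcases List.mem_cons.mp hy with rfl | hy'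
      · exact phi_succ_le grid s k _
      · obtain ⟨q, hqmem, hbq, rfl⟩ := hrest y hy'
        by_cases hq1 : phiF grid s k q < bInf grid
        · obtain ⟨j', e, _, hj'k, hrp', _⟩ := phi_spec grid s k q hq1
          rw [e]
          have hstep : rp grid s (j' + 1) ((r : Int), (c : Int)) = true :=
            (rp_succ grid s j' _).mpr (Or.inr ⟨hall, q, hqmem, Or.inr hrp'⟩)
          have := phi_le_of_rp grid s hstep (by omega : j' + 1 ≤ k + 1)
          push_cast at this ⊢
          omega
        · have he : phiF grid s k q = bInf grid :=
            le_antisymm (phi_le_inf grid s k q) (not_lt.mp hq1)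
          rw [he]
          have := phi_le_inf grid s (k + 1) ((r : Int), (c : Int))
          omega
    have hB : phiF grid s (k + 1) ((r : Int), (c : Int)) ∈
        phiF grid s k ((r : Int), (c : Int)) :: rest := by
      by_cases h1 : phiF grid s k ((r : Int), (c : Int)) < bInf grid
      · have hv : phiF grid s (k + 1) ((r : Int), (c : Int))
            = phiF grid s k ((r : Int), (c : Int)) := by rw [phiF, if_pos h1]
        rw [hv]
        exact List.mem_cons_self
      · have hnrk : rp grid s k ((r : Int), (c : Int)) = false := by
          cases hrk : rp grid s k ((r : Int), (c : Int)) with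
          | true => exact absurd ((phi_lt_inf_iff grid s k _).mpr hrk) h1
          | false => rfl
        by_cases h2 : rp grid s (k + 1) ((r : Int), (c : Int)) = true
        · have hv : phiF grid s (k + 1) ((r : Int), (c : Int)) = (k : Int) + 1 := by
            rw [phiF, if_neg h1, if_pos h2]
          rcases (rp_succ grid s k _).mp h2 with hcase | ⟨_, q, hqmem, hq⟩
          · rw [hnrk] at hcase; cases hcase
          · rcases hq with rfl | hq'
            · have := rp_seed grid q hall hqmem hk
              rw [hnrk] at this; cases this
            · have hbq : ccInBox grid q := (rp_allowed grid s hq').1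
              have hqval : phiF grid s k q = (k : Int) := by
                refine le_antisymm (phi_le_of_rp grid s hq' le_rfl) ?_
                obtain ⟨j', e, _, hj'k, hrp', _⟩ :=
                  phi_spec grid s k q ((phi_lt_inf_iff grid s k q).mpr hq')
                rw [e]
                by_contra hlt
                push_neg at hlt
                have hj'lt : j' < k := by exact_mod_cast hlt
                have hstep : rp grid s (j' + 1) ((r : Int), (c : Int)) = true :=
                  (rp_succ grid s j' _).mpr (Or.inr ⟨hall, q, hqmem, Or.inr hrp'⟩)
                have := rp_mono grid s (by omega : j' + 1 ≤ k) hstep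
                rw [hnrk] at this; cases this
              have hmem : (bGet (phiGrid grid s k) q.1 q.2 + 1) ∈ rest := by
                rw [hrest_def, List.mem_filterMap]
                exact ⟨q, hqmem, by rw [if_pos hbq]⟩
              have hbg := bGet_phiGrid grid s k q.1 q.2 hbq.1 hbq.2.1 hbq.2.2.1 hbq.2.2.2
              rw [Prod.mk.eta] at hbg
              rw [hbg, hqval] at hmem
              rw [hv]
              exact List.mem_cons_of_mem _ hmem
        · have hv : phiF grid s (k + 1) ((r : Int), (c : Int)) = bInf grid := by
            rw [phiF, if_neg h1, if_neg (by simpa using h2)]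
          have he : phiF grid s k ((r : Int), (c : Int)) = bInf grid :=
            le_antisymm (phi_le_inf grid s k _) (not_lt.mp h1)
          rw [hv, ← he]
          exact List.mem_cons_self
    have hmem := PySem.List.min?_mem hsome
    have hmin := PySem.List.min?_isMin hsome
    exact le_antisymm (hmin _ hB) (hA _ hmem)

lemma phiGrid_congr (grid : List (List String)) (s : Int × Int) {a b : Nat}
    (h : ∀ p, phiF grid s a p = phiF grid s b p) :
    phiGrid grid s a = phiGrid grid s b := by
  unfold phiGrid
  apply List.map_congr_left
  intro r _
  apply List.map_congr_left
  intro c _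
  exact h _

lemma gridEq_to_stall (grid : List (List String)) (s : Int × Int) {k : Nat}
    (h : phiGrid grid s (k + 1) = phiGrid grid s k) :
    ∀ p, rp grid s (k + 1) p = rp grid s k p := by
  intro p
  by_cases hbox : ccInBox grid p
  · have h1 := bGet_phiGrid grid s (k + 1) p.1 p.2 hbox.1 hbox.2.1 hbox.2.2.1 hbox.2.2.2
    have h2 := bGet_phiGrid grid s k p.1 p.2 hbox.1 hbox.2.1 hbox.2.2.1 hbox.2.2.2
    rw [Prod.mk.eta] at h1 h2
    have he : phiF grid s (k + 1) p = phiF grid s k p := by rw [← h1, ← h2, h]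
    apply bool_eq_of_iff
    rw [← phi_lt_inf_iff, ← phi_lt_inf_iff, he]
  · apply bool_eq_of_iff
    constructor
    · intro hc; exact absurd (rp_allowed grid s hc).1 hbox
    · intro hc; exact absurd (rp_allowed grid s hc).1 hbox

lemma bLoop_phi (grid : List (List String)) (s : Int × Int) :
    ∀ (fuel k : Nat), 1 ≤ k → k ≤ grid.length * nC grid + 1 →
      grid.length * nC grid + 2 ≤ k + fuel →
      bLoop grid fuel (phiGrid grid s k) = phiGrid grid s (grid.length * nC grid + 1) := by
  intro fuel
  induction fuel with
  | zero => intro k h1 h2 h3; exfalso; omega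
  | succ fuel ih =>
    intro k h1 h2 h3
    rw [bLoop]
    rw [bStep_phi grid s k h1]
    by_cases he : phiGrid grid s (k + 1) = phiGrid grid s k
    · rw [if_pos he]
      have hst := gridEq_to_stall grid s he
      exact (phiGrid_congr grid s
        (fun p => (phi_stall grid s (k := k) hst (grid.length * nC grid + 1) (by omega) p))).symm
    · rw [if_neg he]
      have hkle : k ≤ grid.length * nC grid := by
        by_contra hgt
        have hk' : k = grid.length * nC grid + 1 := by omega
        subst hk'
        have hst : ∀ p, rp grid s (grid.length * nC grid + 1 + 1) p
            = rp grid s (grid.length * nC grid + 1) p := by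
          intro p
          exact (rp_ge_stab grid s _ (by omega) p).trans
            (rp_ge_stab grid s _ (by omega) p).symm
        have hst0 : ∀ p, rp grid s (grid.length * nC grid + 1) p
            = rp grid s (grid.length * nC grid) p := by
          intro p
          exact (rp_ge_stab grid s _ (by omega) p).trans
            (rp_ge_stab grid s _ (by omega) p).symm
        exact he (phiGrid_congr grid s (fun p =>
          (phi_stall grid s (k := grid.length * nC grid) hst0
            (grid.length * nC grid + 1 + 1) (by omega) p).trans
          (phi_stall grid s (k := grid.length * nC grid) hst0
            (grid.length * nC grid + 1) (by omega) p).symm))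
      exact ih (k + 1) (by omega) (by omega) (by omega)

-- ---------- the final minimum-taking fold ----------
lemma pvfold_le {α : Type} (Q : α → Prop) [DecidablePred Q] (v : α → Int) :
    ∀ (l : List α) (b : Int),
      l.foldl (fun b x => if Q x ∧ v x < b then v x else b) b ≤ b := by
  intro l
  induction l with
  | nil => intro b; exact le_rfl
  | cons x l ih =>
    intro b
    rw [List.foldl_cons]
    by_cases h : Q x ∧ v x < b
    · rw [if_pos h]
      exact le_trans (ih _) (le_of_lt h.2)
    · rw [if_neg h]
      exact ih _

lemma pvfold_le_mem {α : Type} (Q : α → Prop) [DecidablePred Q] (v : α → Int) :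
    ∀ (l : List α) (b : Int) (x : α), x ∈ l → Q x →
      l.foldl (fun b x => if Q x ∧ v x < b then v x else b) b ≤ v x := by
  intro l
  induction l with
  | nil => intro b x hx; cases hx
  | cons y l ih =>
    intro b x hx hQ
    rw [List.foldl_cons]
    rcases List.mem_cons.mp hx with rfl | hx'
    · refine le_trans (pvfold_le Q v l _) ?_
      split_ifs with h
      · exact le_rfl
      · have : ¬ v x < b := fun hlt => h ⟨hQ, hlt⟩
        omega
    · exact ih _ x hx' hQ

lemma pvfold_cases {α : Type} (Q : α → Prop) [DecidablePred Q] (v : α → Int) :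
    ∀ (l : List α) (b : Int),
      l.foldl (fun b x => if Q x ∧ v x < b then v x else b) b = b ∨
      ∃ x ∈ l, Q x ∧ l.foldl (fun b x => if Q x ∧ v x < b then v x else b) b = v x := by
  intro l
  induction l with
  | nil => intro b; exact Or.inl rfl
  | cons y l ih =>
    intro b
    rw [List.foldl_cons]
    by_cases h : Q y ∧ v y < b
    · rw [if_pos h]
      rcases ih (v y) with h' | ⟨x, hx, hQ, h'⟩
      · exact Or.inr ⟨y, List.mem_cons_self, h.1, h'⟩
      · exact Or.inr ⟨x, List.mem_cons_of_mem _ hx, hQ, h'⟩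
    · rw [if_neg h]
      rcases ih b with h' | ⟨x, hx, hQ, h'⟩
      · exact Or.inl h'
      · exact Or.inr ⟨x, List.mem_cons_of_mem _ hx, hQ, h'⟩


lemma pvofold_le {α : Type} (G : Int → α → Int) (hG : ∀ b x, G b x ≤ b) :
    ∀ (l : List α) (b : Int), l.foldl G b ≤ b := by
  intro l
  induction l with
  | nil => intro b; exact le_rfl
  | cons x l ih =>
    intro b
    rw [List.foldl_cons]
    exact le_trans (ih _) (hG b x)

lemma pvofold_le_mem {α : Type} (G : Int → α → Int) (hG : ∀ b x, G b x ≤ b)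
    (x : α) (t : Int) (hx : ∀ b, G b x ≤ t) :
    ∀ (l : List α) (b : Int), x ∈ l → l.foldl G b ≤ t := by
  intro l
  induction l with
  | nil => intro b hb; cases hb
  | cons y l ih =>
    intro b hb
    rw [List.foldl_cons]
    rcases List.mem_cons.mp hb with rfl | hb'
    · exact le_trans (pvofold_le G hG l _) (hx b)
    · exact ih _ hb'

lemma pvofold_inv {α : Type} (G : Int → α → Int) (P : Int → Prop) :
    ∀ (l : List α) (b : Int), P b → (∀ b x, x ∈ l → P b → P (G b x)) → P (l.foldl G b) := by
  intro l
  induction l with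
  | nil => intro b hb _; exact hb
  | cons x l ih =>
    intro b hb hstep
    rw [List.foldl_cons]
    exact ih _ (hstep b x List.mem_cons_self hb)
      (fun b' y hy hP => hstep b' y (List.mem_cons_of_mem _ hy) hP)

def bBestG (grid : List (List String)) (dist : List (List Int)) (b : Int) (r : Nat) : Int :=
  (List.range (nC grid)).foldl (fun (best : Int) (c : Nat) =>
    if pvCell grid (r : Int) (c : Int) = "C" ∧ bGet dist (r : Int) (c : Int) < best
    then bGet dist (r : Int) (c : Int) else best) b

lemma bBest_eq (grid : List (List String)) (dist : List (List Int)) :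
    bBest grid dist = (List.range grid.length).foldl (bBestG grid dist) (bInf grid) := rfl

lemma bBestG_le (grid : List (List String)) (dist : List (List Int)) :
    ∀ (b : Int) (r : Nat), bBestG grid dist b r ≤ b := by
  intro b r
  exact pvfold_le (fun c : Nat => pvCell grid (r : Int) (c : Int) = "C")
    (fun c : Nat => bGet dist (r : Int) (c : Int)) (List.range (nC grid)) b

lemma bBest_le_cell (grid : List (List String)) (dist : List (List Int)) (r c : Nat)
    (hr : r < grid.length) (hc : c < nC grid) (hC : pvCell grid (r : Int) (c : Int) = "C") :
    bBest grid dist ≤ bGet dist (r : Int) (c : Int) := by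
  rw [bBest_eq]
  refine pvofold_le_mem (bBestG grid dist) (bBestG_le grid dist) r
    (bGet dist (r : Int) (c : Int)) ?_ _ _ (List.mem_range.mpr hr)
  intro b
  exact pvfold_le_mem (fun c' : Nat => pvCell grid (r : Int) (c' : Int) = "C")
    (fun c' : Nat => bGet dist (r : Int) (c' : Int)) (List.range (nC grid)) b c
    (List.mem_range.mpr hc) hC

lemma bBest_cases (grid : List (List String)) (dist : List (List Int)) :
    bBest grid dist = bInf grid ∨ ∃ r c : Nat, r < grid.length ∧ c < nC grid ∧
      pvCell grid (r : Int) (c : Int) = "C" ∧ bBest grid dist = bGet dist (r : Int) (c : Int) := by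
  rw [bBest_eq]
  refine pvofold_inv (bBestG grid dist)
    (fun z => z = bInf grid ∨ ∃ r c : Nat, r < grid.length ∧ c < nC grid ∧
      pvCell grid (r : Int) (c : Int) = "C" ∧ z = bGet dist (r : Int) (c : Int))
    _ _ (Or.inl rfl) ?_
  intro b r hrl hPb
  rcases pvfold_cases (fun c' : Nat => pvCell grid (r : Int) (c' : Int) = "C")
      (fun c' : Nat => bGet dist (r : Int) (c' : Int)) (List.range (nC grid)) b with h | ⟨cN, hcmem, hQ, h⟩
  · have h' : bBestG grid dist b r = b := h
    rw [h']
    exact hPb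
  · have h' : bBestG grid dist b r = bGet dist (r : Int) (cN : Int) := h
    exact Or.inr ⟨r, cN, List.mem_range.mp hrl, List.mem_range.mp hcmem, hQ, h'⟩

-- ---------- the BFS layers compute the reachability levels ----------
lemma RkP_mono (grid : List (List String)) (s : Int × Int) {j k : Nat} (h : j ≤ k)
    {p : Int × Int} (hp : RkP grid s j p) : RkP grid s k p := by
  rcases hp with he | hrp
  · exact Or.inl he
  · exact Or.inr (rp_mono grid s h hrp)

lemma innerC (grid : List (List String)) :
    ∀ (fr next : List (Int × Int)) (vis : PySem.Set (Int × Int)),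
      (ccInnerB grid fr next vis).1 = true ↔ ∃ q ∈ fr, pvCell grid q.1 q.2 = "C" := by
  intro fr
  induction fr with
  | nil => intro next vis; simp [ccInnerB]
  | cons hd rest ih =>
    obtain ⟨row, col⟩ := hd
    intro next vis
    by_cases hc : pvCell grid row col = "C"
    · simp only [ccInnerB, if_pos hc]
      constructor
      · intro _; exact ⟨(row, col), List.mem_cons_self, hc⟩
      · intro _; trivial
    · simp only [ccInnerB, if_neg hc]
      rw [ih]
      constructor
      · rintro ⟨q, hq, hCq⟩
        exact ⟨q, List.mem_cons_of_mem _ hq, hCq⟩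
      · rintro ⟨q, hq, hCq⟩
        rcases List.mem_cons.mp hq with rfl | hq'
        · exact absurd hCq hc
        · exact ⟨q, hq', hCq⟩

lemma innerSpec (grid : List (List String)) :
    ∀ (fr next : List (Int × Int)) (vis : PySem.Set (Int × Int)),
      (∀ q ∈ fr, pvCell grid q.1 q.2 ≠ "C") → ∃ adds,
      ccInnerB grid fr next vis = (false, next ++ adds, vis ++ adds) ∧ adds.Nodup ∧
      (∀ p ∈ adds, p ∉ vis) ∧
      (∀ p ∈ adds, ccInBox grid p ∧ pvCell grid p.1 p.2 ≠ "X" ∧ ∃ q ∈ fr, p ∈ bCands q.1 q.2) ∧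
      (∀ q ∈ fr, ∀ p ∈ bCands q.1 q.2, ccInBox grid p → pvCell grid p.1 p.2 ≠ "X" →
        p ∈ vis ++ adds) := by
  intro fr
  induction fr with
  | nil =>
    intro next vis _
    exact ⟨[], by simp [ccInnerB], by simp, by simp, by simp, by simp⟩
  | cons hd rest ih =>
    obtain ⟨row, col⟩ := hd
    intro next vis hnc
    have hc : pvCell grid row col ≠ "C" := hnc _ List.mem_cons_self
    obtain ⟨adds0, hB0, _, hbox0, hnd0, hfresh0, hcm0, hcov0⟩ :=
      ccFold_spec grid 0 (bCands row col) [] next vis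
    obtain ⟨adds1, hEq1, hnd1, hfresh1, hprop1, hcov1⟩ :=
      ih (next ++ adds0) (vis ++ adds0) (fun q hq => hnc q (List.mem_cons_of_mem _ hq))
    refine ⟨adds0 ++ adds1, ?_, ?_, ?_, ?_, ?_⟩
    · simp only [ccInnerB, if_neg hc]
      rw [hB0]
      simpa [List.append_assoc] using hEq1
    · exact List.Nodup.append hnd0 hnd1
        (fun x h0 h1 => hfresh1 x h1 (List.mem_append_right _ h0))
    · intro p hp
      rcases List.mem_append.mp hp with h0 | h1
      · exact hfresh0 p h0
      · exact fun hv => hfresh1 p h1 (List.mem_append_left _ hv)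
    · intro p hp
      rcases List.mem_append.mp hp with h0 | h1
      · exact ⟨hbox0 p h0, (hcm0 p h0).1, (row, col), List.mem_cons_self, (hcm0 p h0).2⟩
      · obtain ⟨hb, hx, q, hq, hm⟩ := hprop1 p h1
        exact ⟨hb, hx, q, List.mem_cons_of_mem _ hq, hm⟩
    · intro q hq p hpmem hbp hxp
      rcases List.mem_cons.mp hq with rfl | hq'
      · have := hcov0 p hpmem hbp hxp
        rcases List.mem_append.mp this with hv | ha
        · exact List.mem_append_left _ hv
        · exact List.mem_append_right _ (List.mem_append_left _ ha)
      · have := hcov1 q hq' p hpmem hbp hxp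
        simpa [List.append_assoc] using this

lemma inner_invars (grid : List (List String)) (s : Int × Int) (k : Nat)
    (fr adds : List (Int × Int)) (vis : PySem.Set (Int × Int))
    (H1 : ∀ p, p ∈ vis ↔ RkP grid s k p)
    (H2 : ∀ p, p ∈ fr ↔ (RkP grid s k p ∧ ∀ j, j < k → ¬ RkP grid s j p))
    (hfresh : ∀ p ∈ adds, p ∉ vis)
    (hprop : ∀ p ∈ adds, ccInBox grid p ∧ pvCell grid p.1 p.2 ≠ "X" ∧ ∃ q ∈ fr, p ∈ bCands q.1 q.2)
    (hcov : ∀ q ∈ fr, ∀ p ∈ bCands q.1 q.2, ccInBox grid p → pvCell grid p.1 p.2 ≠ "X" →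
      p ∈ vis ++ adds) :
    (∀ p, p ∈ vis ++ adds ↔ RkP grid s (k + 1) p) ∧
    (∀ p, p ∈ adds ↔ (RkP grid s (k + 1) p ∧ ∀ j, j < k + 1 → ¬ RkP grid s j p)) := by
  have hAdd : ∀ p ∈ adds, RkP grid s (k + 1) p ∧ ∀ j, j < k + 1 → ¬ RkP grid s j p := by
    intro p hp
    obtain ⟨hbox, hX, q, hqfr, hpq⟩ := hprop p hp
    have hq := ((H2 q).mp hqfr).1
    have hnotv := hfresh p hp
    have hnotk : ¬ RkP grid s k p := fun hRk => hnotv ((H1 p).mpr hRk)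
    refine ⟨Or.inr ((rp_succ grid s k p).mpr (Or.inr ⟨⟨hbox, hX⟩, q,
      (mem_bCands_comm p q).mp hpq, ?_⟩)), ?_⟩
    · rcases hq with he | hrp
      · exact Or.inl he
      · exact Or.inr hrp
    · intro j hj hRj
      exact hnotk (RkP_mono grid s (by omega) hRj)
  have hBack : ∀ p, RkP grid s (k + 1) p → (∀ j, j < k + 1 → ¬ RkP grid s j p) → p ∈ adds := by
    intro p hp hfr1
    have hnotk : ¬ RkP grid s k p := hfr1 k (by omega)
    have hnots : p ≠ s := fun he => hfr1 0 (by omega) (Or.inl he)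
    have hrp : rp grid s (k + 1) p = true := by
      rcases hp with he | h
      · exact absurd he hnots
      · exact h
    rcases (rp_succ grid s k p).mp hrp with h | ⟨hall, q, hqm, hq⟩
    · exact absurd (Or.inr h) hnotk
    · have hqfr : q ∈ fr := by
        rcases hq with hqs | hq'
        · subst hqs
          rcases Nat.eq_zero_or_pos k with rfl | hk
          · exact (H2 q).mpr ⟨Or.inl rfl, fun j hj => absurd hj (by omega)⟩
          · exact absurd (Or.inr (rp_seed grid q hall hqm (by omega))) hnotk
        · refine (H2 q).mpr ⟨Or.inr hq', ?_⟩
          intro j hj hRj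
          rcases hRj with hqs | hrj
          · subst hqs
            exact hnotk (Or.inr (rp_seed grid q hall hqm (by omega)))
          · have hstep : rp grid s (j + 1) p = true :=
              (rp_succ grid s j p).mpr (Or.inr ⟨hall, q, hqm, Or.inr hrj⟩)
            exact hnotk (Or.inr (rp_mono grid s (by omega) hstep))
      have hmem := hcov q hqfr p ((mem_bCands_comm p q).mpr hqm) hall.1 hall.2
      rcases List.mem_append.mp hmem with hv | ha
      · exact absurd ((H1 p).mp hv) hnotk
      · exact ha
  constructor
  · intro p
    rw [List.mem_append]
    constructor
    · rintro (hv | ha)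
      · exact RkP_mono grid s (Nat.le_succ k) ((H1 p).mp hv)
      · exact (hAdd p ha).1
    · intro hp
      by_cases hk : RkP grid s k p
      · exact Or.inl ((H1 p).mpr hk)
      · refine Or.inr (hBack p hp ?_)
        intro j hj hRj
        exact hk (RkP_mono grid s (by omega) hRj)
  · intro p
    constructor
    · exact hAdd p
    · rintro ⟨h1, h2⟩
      exact hBack p h1 h2

lemma ccOuterB_succ (grid : List (List String)) (fuel : Nat) (fr : List (Int × Int))
    (vis : PySem.Set (Int × Int)) (d : Int) :
    ccOuterB grid (fuel + 1) fr vis d =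
      if fr = [] then -1
      else
        match ccInnerB grid fr [] vis with
        | (true, _, _) => d
        | (false, next, vis') => ccOuterB grid fuel next vis' (d + 1) := rfl

lemma OuterA1 (grid : List (List String)) (s : Int × Int) :
    ∀ (m k fb : Nat) (fr : List (Int × Int)) (vis : PySem.Set (Int × Int)) (d : Int),
      (∀ p, p ∈ vis ↔ RkP grid s k p) →
      (∀ p, p ∈ fr ↔ (RkP grid s k p ∧ ∀ j, j < k → ¬ RkP grid s j p)) →
      (∀ j, j < k + m → ¬ hasC grid s j) → hasC grid s (k + m) → m + 1 ≤ fb →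
      ccOuterB grid fb fr vis d = d + (m : Int) := by
  intro m
  induction m with
  | zero =>
    intro k fb fr vis d H1 H2 H4 H5 hfb
    obtain ⟨fb', rfl⟩ : ∃ fb', fb = fb' + 1 := ⟨fb - 1, by omega⟩
    obtain ⟨p, hp, hC⟩ := H5
    have hfr : p ∈ fr := (H2 p).mpr ⟨hp, fun j hj hRj => H4 j (by omega) ⟨p, hRj, hC⟩⟩
    have hfrne : fr ≠ [] := by
      intro h; rw [h] at hfr; cases hfr
    rw [ccOuterB_succ, if_neg hfrne]
    have htrue : (ccInnerB grid fr [] vis).1 = true := (innerC grid fr [] vis).mpr ⟨p, hfr, hC⟩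
    rcases hI : ccInnerB grid fr [] vis with ⟨b, next, vis'⟩
    rw [hI] at htrue
    cases b
    · exact absurd htrue (by simp)
    · simp
  | succ m ih =>
    intro k fb fr vis d H1 H2 H4 H5 hfb
    obtain ⟨fb', rfl⟩ : ∃ fb', fb = fb' + 1 := ⟨fb - 1, by omega⟩
    have hnoC : ∀ q ∈ fr, pvCell grid q.1 q.2 ≠ "C" := by
      intro q hq hCq
      exact H4 k (by omega) ⟨q, ((H2 q).mp hq).1, hCq⟩
    have hfrne : fr ≠ [] := by
      intro hfe
      rcases k with _ | k'
      · have hmem : s ∈ fr := (H2 s).mpr ⟨Or.inl rfl, fun j hj => absurd hj (by omega)⟩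
        rw [hfe] at hmem; cases hmem
      · have hsub : ∀ p, RkP grid s (k' + 1) p → RkP grid s k' p := by
          intro p hp
          by_contra hnp
          have hmem : p ∈ fr := (H2 p).mpr
            ⟨hp, fun j hj hRj => hnp (RkP_mono grid s (by omega) hRj)⟩
          rw [hfe] at hmem; cases hmem
        have hprop : ∀ n p, RkP grid s (k' + 1 + n) p → RkP grid s k' p := by
          intro n
          induction n with
          | zero => exact hsub
          | succ n ihn =>
            intro p hp
            rcases hp with he | hp'
            · exact Or.inl he
            · rcases (rp_succ grid s (k' + 1 + n) p).mp hp' with h' | ⟨hall, q, hqmem, hq⟩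
              · exact ihn p (Or.inr h')
              · rcases hq with hqs | hq'
                · subst hqs
                  exact ihn p (Or.inr (rp_seed grid q hall hqmem (by omega)))
                · rcases ihn q (Or.inr hq') with hqs | hq''
                  · subst hqs
                    exact hsub p (Or.inr (rp_seed grid q hall hqmem (by omega)))
                  · exact hsub p (Or.inr ((rp_succ grid s k' p).mpr
                      (Or.inr ⟨hall, q, hqmem, Or.inr hq''⟩)))
        obtain ⟨p, hp, hC⟩ := H5
        have hk' : RkP grid s k' p := by
          have he : k' + 1 + (m + 1) = k' + 1 + m + 1 := by omega
          exact hprop (m + 1) p (by rw [he]; exact hp)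
        exact H4 k' (by omega) ⟨p, hk', hC⟩
    have hfalse : (ccInnerB grid fr [] vis).1 = false := by
      cases hb : (ccInnerB grid fr [] vis).1
      · rfl
      · obtain ⟨q, hq, hCq⟩ := (innerC grid fr [] vis).mp hb
        exact absurd hCq (hnoC q hq)
    obtain ⟨adds, hEq, hndadds, hfresh, hprop, hcov⟩ := innerSpec grid fr [] vis hnoC
    obtain ⟨hH1', hH2'⟩ := inner_invars grid s k fr adds vis H1 H2 hfresh hprop hcov
    rw [ccOuterB_succ, if_neg hfrne, hEq]
    show ccOuterB grid fb' ([] ++ adds) (vis ++ adds) (d + 1) = d + ((m + 1 : Nat) : Int)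
    rw [List.nil_append]
    have hres := ih (k + 1) fb' adds (vis ++ adds) (d + 1) hH1' hH2'
      (fun j hj => H4 j (by omega))
      (by have he : k + 1 + m = k + (m + 1) := by omega
          rw [he]; exact H5)
      (by omega)
    rw [hres]
    push_cast
    ring

lemma OuterA2 (grid : List (List String)) (s : Int × Int) :
    ∀ (fb k : Nat) (fr : List (Int × Int)) (vis : PySem.Set (Int × Int)) (d : Int),
      (∀ p, p ∈ vis ↔ RkP grid s k p) →
      (∀ p, p ∈ fr ↔ (RkP grid s k p ∧ ∀ j, j < k → ¬ RkP grid s j p)) →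
      (∀ j, ¬ hasC grid s j) → k ≤ grid.length * nC grid + 1 →
      grid.length * nC grid + 3 ≤ k + fb →
      ccOuterB grid fb fr vis d = -1 := by
  intro fb
  induction fb with
  | zero =>
    intro k fr vis d _ _ _ h1 h2
    exfalso; omega
  | succ fb ih =>
    intro k fr vis d H1 H2 H4 hk1 hk2
    by_cases hfe : fr = []
    · subst hfe
      rw [ccOuterB_succ, if_pos rfl]
    · have hnoC : ∀ q ∈ fr, pvCell grid q.1 q.2 ≠ "C" := by
        intro q hq hCq
        exact H4 k ⟨q, ((H2 q).mp hq).1, hCq⟩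
      have hkRC : k ≤ grid.length * nC grid := by
        rcases k with _ | k'
        · omega
        · obtain ⟨p, hp⟩ := List.exists_mem_of_ne_nil fr hfe
          obtain ⟨hRk, hfr1⟩ := (H2 p).mp hp
          have hnots : p ≠ s := fun he => hfr1 0 (by omega) (Or.inl he)
          have hrp : rp grid s (k' + 1) p = true := by
            rcases hRk with he | h
            · exact absurd he hnots
            · exact h
          have hnrp : rp grid s k' p = false := by
            cases hr : rp grid s k' p
            · rfl
            · exact absurd (Or.inr hr) (hfr1 k' (by omega))
          exact rp_new_le grid s hrp hnrp
      obtain ⟨adds, hEq, hndadds, hfresh, hprop, hcov⟩ := innerSpec grid fr [] vis hnoC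
      obtain ⟨hH1', hH2'⟩ := inner_invars grid s k fr adds vis H1 H2 hfresh hprop hcov
      rw [ccOuterB_succ, if_neg hfe, hEq]
      show ccOuterB grid fb ([] ++ adds) (vis ++ adds) (d + 1) = -1
      rw [List.nil_append]
      exact ih (k + 1) adds (vis ++ adds) (d + 1) hH1' hH2' H4 (by omega) (by omega)

-- ===== VERDICT (by name: the statement is the Claim_ definition above) =====
theorem closest_carrot_spec : Claim_equal_closest_carrot := by
  intro grid sr sc _ _
  unfold Spec_closest_carrot
  have hA : closest_carrot grid sr sc
      = ccOuterB grid (5 * (grid.length * nC grid) + 5) [(sr, sc)]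
          (PySem.Set.ofList [(sr, sc)]) 0 := by
    unfold closest_carrot
    have h := ccOuterSim grid (5 * (grid.length * nC grid) + 5) [(sr, sc)]
      (PySem.Set.ofList [(sr, sc)]) 0 (5 * (grid.length * nC grid) + 5)
      (PySem.Set.nodup_ofList _) ?_ ?_
    · simpa using h
    all_goals
      unfold ccM
      have := Nat.sub_le (grid.length * nC grid) (ccBoxCount grid (PySem.Set.ofList [(sr, sc)]))
      simp only [List.length_cons, List.length_nil]
      omega
  have hofl : PySem.Set.ofList [((sr : Int), (sc : Int))] = [(sr, sc)] := rfl
  have H1 : ∀ p, p ∈ PySem.Set.ofList [((sr : Int), (sc : Int))] ↔ RkP grid (sr, sc) 0 p := by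
    intro p
    rw [hofl]
    constructor
    · intro h
      exact Or.inl (List.mem_singleton.mp h)
    · rintro (he | hrp)
      · exact List.mem_singleton.mpr he
      · simp [rp] at hrp
  have H2 : ∀ p, p ∈ ([((sr : Int), (sc : Int))] : List (Int × Int)) ↔
      (RkP grid (sr, sc) 0 p ∧ ∀ j, j < 0 → ¬ RkP grid (sr, sc) j p) := by
    intro p
    constructor
    · intro h
      exact ⟨Or.inl (List.mem_singleton.mp h), fun j hj => absurd hj (by omega)⟩
    · rintro ⟨he | hrp, _⟩
      · exact List.mem_singleton.mpr he
      · simp [rp] at hrp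
  have hBdist : bLoop grid (grid.length * nC grid + 2) (bSeed grid sr sc)
      = phiGrid grid (sr, sc) (grid.length * nC grid + 1) := by
    rw [bSeed_phi]
    exact bLoop_phi grid (sr, sc) (grid.length * nC grid + 2) 1 le_rfl (by omega) (by omega)
  have hBval : closest_carrot_alt grid sr sc =
      if pvCell grid sr sc = "C" then 0
      else if bBest grid (phiGrid grid (sr, sc) (grid.length * nC grid + 1)) < bInf grid
        then bBest grid (phiGrid grid (sr, sc) (grid.length * nC grid + 1)) else -1 := by
    simp only [closest_carrot_alt, hBdist]
  rw [hA, hBval]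
  by_cases hCs : pvCell grid sr sc = "C"
  · rw [if_pos hCs]
    have h0 : hasC grid (sr, sc) 0 := ⟨(sr, sc), Or.inl rfl, hCs⟩
    have := OuterA1 grid (sr, sc) 0 0 (5 * (grid.length * nC grid) + 5) [(sr, sc)]
      (PySem.Set.ofList [(sr, sc)]) 0 H1 H2 (fun j hj => absurd hj (by omega)) h0 (by omega)
    simpa using this
  · rw [if_neg hCs]
    by_cases hex : ∃ j, hasC grid (sr, sc) j
    · haveI : DecidablePred (hasC grid (sr, sc)) := fun j => Classical.dec _
      have hCm : hasC grid (sr, sc) (Nat.find hex) := Nat.find_spec hex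
      have hmin : ∀ j, j < Nat.find hex → ¬ hasC grid (sr, sc) j :=
        fun j hj => Nat.find_min hex hj
      have hmle : Nat.find hex ≤ grid.length * nC grid := by
        obtain ⟨p, hp, hC⟩ := hCm
        rcases hp with he | hrp
        · subst he
          exact absurd hC hCs
        · have hstab : rp grid (sr, sc) (grid.length * nC grid) p = true := by
            have e := rp_ge_stab grid (sr, sc)
              (max (Nat.find hex) (grid.length * nC grid)) (le_max_right _ _) p
            have h2 : rp grid (sr, sc) (max (Nat.find hex) (grid.length * nC grid)) p = true :=
              rp_mono grid (sr, sc) (le_max_left _ _) hrp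
            rw [e] at h2
            exact h2
          exact Nat.find_min' hex ⟨p, Or.inr hstab, hC⟩
      have hAm : ccOuterB grid (5 * (grid.length * nC grid) + 5) [(sr, sc)]
          (PySem.Set.ofList [(sr, sc)]) 0 = ((Nat.find hex : Nat) : Int) := by
        have := OuterA1 grid (sr, sc) (Nat.find hex) 0 (5 * (grid.length * nC grid) + 5)
          [(sr, sc)] (PySem.Set.ofList [(sr, sc)]) 0 H1 H2
          (fun j hj => hmin j (by omega))
          (by rw [Nat.zero_add]; exact hCm)
          (by omega)
        simpa using this
      rw [hAm]
      obtain ⟨p0, hp0, hC0⟩ := hCm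
      have hrp0 : rp grid (sr, sc) (Nat.find hex) p0 = true := by
        rcases hp0 with he | h
        · subst he
          exact absurd hC0 hCs
        · exact h
      have hbox0 : ccInBox grid p0 := (rp_allowed grid (sr, sc) hrp0).1
      have hphi0 : phiF grid (sr, sc) (grid.length * nC grid + 1) p0
          = ((Nat.find hex : Nat) : Int) := by
        refine le_antisymm (phi_le_of_rp grid (sr, sc) hrp0 (by omega)) ?_
        have hlt : phiF grid (sr, sc) (grid.length * nC grid + 1) p0 < bInf grid :=
          (phi_lt_inf_iff grid (sr, sc) _ p0).mpr (rp_mono grid (sr, sc) (by omega) hrp0)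
        obtain ⟨j, e, _, _, hrpj, _⟩ := phi_spec grid (sr, sc) _ p0 hlt
        rw [e]
        exact_mod_cast Nat.find_min' hex ⟨p0, Or.inr hrpj, hC0⟩
      obtain ⟨a, b, ha, hb, hab⟩ : ∃ (a b : Nat), a < grid.length ∧ b < nC grid ∧
          p0 = ((a : Int), (b : Int)) := by
        refine ⟨p0.1.toNat, p0.2.toNat, ?_, ?_, ?_⟩
        · have h2 := hbox0.2.1
          simp only [pvRows] at h2
          omega
        · have h4 := hbox0.2.2.2
          simp only [pvCols] at h4
          omega
        · have h1 := hbox0.1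
          have h3 := hbox0.2.2.1
          cases p0 with
          | mk x y =>
            simp only [Prod.ext_iff]
            constructor <;> simp <;> omega
      have hbga : bGet (phiGrid grid (sr, sc) (grid.length * nC grid + 1)) (a : Int) (b : Int)
          = phiF grid (sr, sc) (grid.length * nC grid + 1) ((a : Int), (b : Int)) :=
        bGet_phiGrid grid (sr, sc) _ _ _ (Int.natCast_nonneg a)
          (by simp only [pvRows]; exact_mod_cast ha) (Int.natCast_nonneg b)
          (by simp only [pvCols]; exact_mod_cast hb)
      have hCab : pvCell grid (a : Int) (b : Int) = "C" := by
        rw [hab] at hC0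
        exact hC0
      have hupper : bBest grid (phiGrid grid (sr, sc) (grid.length * nC grid + 1))
          ≤ ((Nat.find hex : Nat) : Int) := by
        have h := bBest_le_cell grid (phiGrid grid (sr, sc) (grid.length * nC grid + 1)) a b ha hb hCab
        rw [hbga, ← hab, hphi0] at h
        exact h
      have hlower : ((Nat.find hex : Nat) : Int)
          ≤ bBest grid (phiGrid grid (sr, sc) (grid.length * nC grid + 1)) := by
        rcases bBest_cases grid (phiGrid grid (sr, sc) (grid.length * nC grid + 1)) with
          h | ⟨r, c, hr, hc, hC, hval⟩
        · rw [h, bInf_eq]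
          push_cast
          omega
        · rw [hval]
          have hbg : bGet (phiGrid grid (sr, sc) (grid.length * nC grid + 1)) (r : Int) (c : Int)
              = phiF grid (sr, sc) (grid.length * nC grid + 1) ((r : Int), (c : Int)) :=
            bGet_phiGrid grid (sr, sc) _ _ _ (Int.natCast_nonneg r)
              (by simp only [pvRows]; exact_mod_cast hr) (Int.natCast_nonneg c)
              (by simp only [pvCols]; exact_mod_cast hc)
          rw [hbg]
          by_cases hlt : phiF grid (sr, sc) (grid.length * nC grid + 1) ((r : Int), (c : Int))
              < bInf grid
          · obtain ⟨j, e, _, _, hrpj, _⟩ := phi_spec grid (sr, sc) _ _ hlt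
            rw [e]
            exact_mod_cast Nat.find_min' hex ⟨((r : Int), (c : Int)), Or.inr hrpj, hC⟩
          · rw [le_antisymm (phi_le_inf grid (sr, sc) _ _) (not_lt.mp hlt), bInf_eq]
            push_cast
            omega
      rw [le_antisymm hupper hlower, if_pos (by rw [bInf_eq]; push_cast; omega)]
    · push_neg at hex
      have hA1 : ccOuterB grid (5 * (grid.length * nC grid) + 5) [(sr, sc)]
          (PySem.Set.ofList [(sr, sc)]) 0 = -1 :=
        OuterA2 grid (sr, sc) (5 * (grid.length * nC grid) + 5) 0 [(sr, sc)]
          (PySem.Set.ofList [(sr, sc)]) 0 H1 H2 hex (by omega) (by omega)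
      rw [hA1]
      have hbb : bBest grid (phiGrid grid (sr, sc) (grid.length * nC grid + 1)) = bInf grid := by
        rcases bBest_cases grid (phiGrid grid (sr, sc) (grid.length * nC grid + 1)) with
          h | ⟨r, c, hr, hc, hC, hval⟩
        · exact h
        · have hbg : bGet (phiGrid grid (sr, sc) (grid.length * nC grid + 1)) (r : Int) (c : Int)
              = phiF grid (sr, sc) (grid.length * nC grid + 1) ((r : Int), (c : Int)) :=
            bGet_phiGrid grid (sr, sc) _ _ _ (Int.natCast_nonneg r)
              (by simp only [pvRows]; exact_mod_cast hr) (Int.natCast_nonneg c)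
              (by simp only [pvCols]; exact_mod_cast hc)
          have hphi : phiF grid (sr, sc) (grid.length * nC grid + 1) ((r : Int), (c : Int))
              = bInf grid := by
            by_cases hlt : phiF grid (sr, sc) (grid.length * nC grid + 1) ((r : Int), (c : Int))
                < bInf grid
            · obtain ⟨j, e, _, _, hrpj, _⟩ := phi_spec grid (sr, sc) _ _ hlt
              exact absurd ⟨((r : Int), (c : Int)), Or.inr hrpj, hC⟩ (hex j)
            · exact le_antisymm (phi_le_inf grid (sr, sc) _ _) (not_lt.mp hlt)
          rw [hval, hbg, hphi]
      rw [hbb, if_neg (lt_irrefl _)]
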